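-- pv_equiv track=rewrite | github.com/RafayAK/CodingPrep | DailyCodingProblem/194_Facebook_Count_Pairs_Of_Line_Segments.py | number_of_intersecting_line_segments
-- ===== SOURCE A (Python) =====
-- def number_of_intersecting_line_segments(P, Q):
--
--     points = []
--     for p,q in zip(P, Q):
--         points.append((p,q))
--
--     points.sort(key=lambda x: x[0])  # Sort by p
--
--     count_intersecting_line_segments = 0
--     for i,(p_1, q_1) in enumerate(points):
--         for p_2,q_2 in points[i+1:]:
--             # we have an intersection if q1 bigger than q2
--             if q_1 > q_2:
--                 count_intersecting_line_segments += 1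
--
--     return count_intersecting_line_segments
-- ===== SOURCE B (Python) =====
-- def number_of_intersecting_line_segments(P, Q):
--     points = sorted(zip(P, Q), key=lambda x: x[0])
--     qs = [q for _, q in points]
--
--     def msort(a):
--         if len(a) <= 1:
--             return a, 0
--         mid = len(a) // 2
--         left, inv_l = msort(a[:mid])
--         right, inv_r = msort(a[mid:])
--         merged = []
--         inv = inv_l + inv_r
--         i = j = 0
--         while i < len(left) and j < len(right):
--             if left[i] <= right[j]:
--                 merged.append(left[i])
--                 i += 1
--             else:
--                 inv += len(left) - i
--                 merged.append(right[j])
--                 j += 1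
--         merged.extend(left[i:])
--         merged.extend(right[j:])
--         return merged, inv
--
--     return msort(qs)[1]
-- ===== Notes on version B (the rewrite author's own statement) =====
-- stated objective: faster
-- what changed: Replaced the quadratic nested scan over the p-sorted points by a merge-sort inversion count on the q-sequence.
import Mathlib
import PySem

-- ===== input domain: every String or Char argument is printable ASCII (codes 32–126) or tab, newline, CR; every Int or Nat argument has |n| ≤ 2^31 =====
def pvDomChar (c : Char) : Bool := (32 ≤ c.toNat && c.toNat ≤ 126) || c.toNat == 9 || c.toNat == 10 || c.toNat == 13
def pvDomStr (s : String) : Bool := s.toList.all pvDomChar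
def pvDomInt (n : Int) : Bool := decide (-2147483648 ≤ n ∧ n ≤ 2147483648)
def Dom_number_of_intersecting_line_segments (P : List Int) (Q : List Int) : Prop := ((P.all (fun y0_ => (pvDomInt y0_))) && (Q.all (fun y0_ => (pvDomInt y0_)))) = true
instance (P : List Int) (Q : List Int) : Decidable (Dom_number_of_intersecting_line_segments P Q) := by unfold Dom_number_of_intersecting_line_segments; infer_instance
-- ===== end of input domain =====

-- B replaces A's quadratic nested scan by a merge-sort inversion count on the q-sequence (asymptotically faster).


-- ===== PORT A =====
def number_of_intersecting_line_segments (P : List Int) (Q : List Int) : Int :=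
  -- points = []; for p,q in zip(P,Q): points.append((p,q))
  let points := (P.zip Q).foldl (fun acc pq => acc ++ [pq]) []
  -- points.sort(key=lambda x: x[0])
  let points := PySem.List.sorted points (fun x => x.1) false
  -- nested loop: for i,(p_1,q_1) in enumerate(points): for p_2,q_2 in points[i+1:]: …
  (PySem.List.enumerate points 0).foldl
    (fun count ipq =>
      (PySem.List.slice points (some (ipq.1 + 1)) none).foldl
        (fun c pq => if ipq.2.2 > pq.2 then c + 1 else c) count) 0

-- ===== PORT B =====
-- the merge step of msort's while-loop plus the two extends (recursion on the two index cursors)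
def pvMerge : List Int → List Int → List Int × Int
  | [], ys => (ys, 0)
  | x :: xs, [] => (x :: xs, 0)
  | x :: xs, y :: ys =>
    if x ≤ y then
      let r := pvMerge xs (y :: ys)
      (x :: r.1, r.2)
    else
      let r := pvMerge (x :: xs) ys
      (y :: r.1, r.2 + ((x :: xs).length : Int))

-- msort from Source B: split at len//2, recurse, merge counting split inversions
def pvMsort (a : List Int) : List Int × Int :=
  if a.length ≤ 1 then (a, 0)
  else
    let mid := a.length / 2
    let l := pvMsort (a.take mid)
    let r := pvMsort (a.drop mid)
    let m := pvMerge l.1 r.1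
    (m.1, l.2 + r.2 + m.2)
termination_by a.length
decreasing_by
  · simp only [List.length_take]; omega
  · simp only [List.length_drop]; omega

def number_of_intersecting_line_segments_alt (P : List Int) (Q : List Int) : Int :=
  let points := PySem.List.sorted (P.zip Q) (fun x => x.1) false
  let qs := points.map (fun pq => pq.2)
  (pvMsort qs).2

-- ===== PRECONDITION & SPEC =====
def Spec_number_of_intersecting_line_segments (P : List Int) (Q : List Int) (out : Int) : Prop := out = number_of_intersecting_line_segments_alt P Q
instance (P : List Int) (Q : List Int) (out : Int) : Decidable (Spec_number_of_intersecting_line_segments P Q out) := by unfold Spec_number_of_intersecting_line_segments; infer_instance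

-- ===== CLAIM (what is proved, stated in full; the proofs are below) =====
def Claim_equal_number_of_intersecting_line_segments : Prop := ∀ (P : List Int) (Q : List Int), Dom_number_of_intersecting_line_segments P Q → Spec_number_of_intersecting_line_segments P Q (number_of_intersecting_line_segments P Q)

-- ===== LEMMAS AND PROOFS =====

-- number of inversions of a list (the common specification both ports are reduced to)
def invN : List Int → Nat
  | [] => 0
  | x :: xs => xs.countP (fun y => decide (y < x)) + invN xs

-- number of inverted cross pairs between two lists
def crossN (xs ys : List Int) : Nat :=
  (xs.map (fun x => ys.countP (fun y => decide (y < x)))).sum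

lemma foldl_append_singleton (l : List (Int × Int)) (acc : List (Int × Int)) :
    l.foldl (fun a pq => a ++ [pq]) acc = acc ++ l := by
  induction l generalizing acc with
  | nil => simp
  | cons x xs ih => simp [List.foldl_cons, ih]

lemma inner_fold (q : Int) (l : List (Int × Int)) (acc : Int) :
    l.foldl (fun c pq => if q > pq.2 then c + 1 else c) acc
      = acc + (l.countP (fun pq => decide (pq.2 < q)) : Int) := by
  induction l generalizing acc with
  | nil => simp
  | cons x xs ih =>
    simp only [List.foldl_cons, List.countP_cons, ih]
    by_cases h : x.2 < q <;> simp [h, gt_iff_lt] <;> ring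

lemma outer_fold (ps : List (Int × Int)) (k : Nat) (acc : Int) (hk : k ≤ ps.length) :
    (PySem.List.enumerate (ps.drop k) (k : Int)).foldl
      (fun count ipq =>
        (PySem.List.slice ps (some (ipq.1 + 1)) none).foldl
          (fun c pq => if ipq.2.2 > pq.2 then c + 1 else c) count) acc
      = acc + (invN ((ps.drop k).map (fun pq => pq.2)) : Int) := by
  induction hn : ps.length - k generalizing k acc with
  | zero =>
    have hd : ps.drop k = [] := List.drop_eq_nil_iff.mpr (by omega)
    simp [hd, invN]
  | succ n ih =>
    have hk' : k < ps.length := by omega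
    have hd : ps.drop k = ps[k] :: ps.drop (k + 1) := List.drop_eq_getElem_cons hk'
    rw [hd, PySem.List.enumerate_cons, List.foldl_cons]
    have hslice : PySem.List.slice ps (some ((k : Int) + 1)) none = ps.drop (k + 1) := by
      have := PySem.List.slice_from_natCast ps (k + 1)
      push_cast at this ⊢
      exact this
    rw [hslice, inner_fold]
    rw [show ((k : Int) + 1) = ((k + 1 : Nat) : Int) by push_cast; ring]
    rw [ih (k + 1) _ (by omega) (by omega)]
    rw [List.map_cons]
    show _ = acc + ((List.countP (fun y => decide (y < ps[k].2)) ((ps.drop (k+1)).map (fun pq => pq.2)) + invN ((ps.drop (k+1)).map (fun pq => pq.2)) : Nat) : Int)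
    rw [List.countP_map]
    simp only [Function.comp_def]
    push_cast
    ring

lemma invN_append (xs ys : List Int) :
    invN (xs ++ ys) = invN xs + invN ys + crossN xs ys := by
  induction xs with
  | nil => simp [invN, crossN]
  | cons x xs ih => simp [invN, crossN, List.countP_append, ih, List.map_cons]; omega

lemma crossN_perm_left {xs xs' : List Int} (h : xs.Perm xs') (ys : List Int) :
    crossN xs ys = crossN xs' ys :=
  List.Perm.sum_eq (h.map _)

lemma crossN_perm_right (xs : List Int) {ys ys' : List Int} (h : ys.Perm ys') :
    crossN xs ys = crossN xs ys' := by
  unfold crossN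
  congr 1
  exact List.map_congr_left (fun x _ => h.countP_eq _)

lemma crossN_nil_right (xs : List Int) : crossN xs [] = 0 := by
  simp [crossN]

lemma crossN_cons_left (x : Int) (xs ys : List Int) :
    crossN (x :: xs) ys = ys.countP (fun y => decide (y < x)) + crossN xs ys := by
  simp [crossN]

lemma crossN_cons_right (xs : List Int) (y : Int) (ys : List Int) :
    crossN xs (y :: ys) = xs.countP (fun x => decide (y < x)) + crossN xs ys := by
  induction xs with
  | nil => simp [crossN]
  | cons x xs ih =>
    simp only [crossN_cons_left, List.countP_cons, ih]
    by_cases h : y < x <;> simp [h] <;> omega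

lemma pvMerge_spec (xs ys : List Int) (hx : xs.Pairwise (· ≤ ·)) (hy : ys.Pairwise (· ≤ ·)) :
    (pvMerge xs ys).1.Perm (xs ++ ys) ∧ (pvMerge xs ys).1.Pairwise (· ≤ ·) ∧
      (pvMerge xs ys).2 = (crossN xs ys : Int) := by
  fun_induction pvMerge xs ys with
  | case1 ys => simpa [pvMerge, crossN] using hy
  | case2 x xs => simpa [pvMerge, crossN_nil_right] using hx
  | case3 x xs y ys hle r ih =>
    obtain ⟨hperm, hsort, hcnt⟩ := ih hx.tail hy
    refine ⟨hperm.cons x, ?_, ?_⟩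
    · refine List.pairwise_cons.mpr ⟨?_, hsort⟩
      intro a ha
      have ha' : a ∈ xs ++ (y :: ys) := hperm.mem_iff.mp ha
      rcases List.mem_append.mp ha' with h | h
      · exact (List.pairwise_cons.mp hx).1 a h
      · rcases List.mem_cons.mp h with rfl | h
        · exact hle
        · exact le_trans hle ((List.pairwise_cons.mp hy).1 a h)
    · show r.2 = _
      rw [show r.2 = (pvMerge xs (y :: ys)).2 from rfl, hcnt, crossN_cons_left]
      have h0 : (y :: ys).countP (fun y' => decide (y' < x)) = 0 := by
        refine List.countP_eq_zero.mpr ?_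
        intro a ha
        rcases List.mem_cons.mp ha with rfl | h
        · simpa using not_lt.mpr hle
        · simpa using not_lt.mpr (le_trans hle ((List.pairwise_cons.mp hy).1 a h))
      rw [h0]
      push_cast
      ring
  | case4 x xs y ys hle r ih =>
    obtain ⟨hperm, hsort, hcnt⟩ := ih hx hy.tail
    have hyx : y < x := lt_of_not_ge hle
    have hall : ∀ a ∈ x :: xs, y < a := by
      intro a ha
      rcases List.mem_cons.mp ha with rfl | h
      · exact hyx
      · exact lt_of_lt_of_le hyx ((List.pairwise_cons.mp hx).1 a h)
    refine ⟨?_, ?_, ?_⟩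
    · exact (hperm.cons y).trans List.perm_middle.symm
    · refine List.pairwise_cons.mpr ⟨?_, hsort⟩
      intro a ha
      have ha' : a ∈ (x :: xs) ++ ys := hperm.mem_iff.mp ha
      rcases List.mem_append.mp ha' with h | h
      · exact le_of_lt (hall a h)
      · exact (List.pairwise_cons.mp hy).1 a h
    · show r.2 + ((x :: xs).length : Int) = _
      rw [show r.2 = (pvMerge (x :: xs)  ys).2 from rfl, hcnt, crossN_cons_right]
      rw [List.countP_eq_length.mpr (by intro a ha; simpa using hall a ha)]
      push_cast
      ring

lemma pvMsort_spec (a : List Int) :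
    (pvMsort a).1.Perm a ∧ (pvMsort a).1.Pairwise (· ≤ ·) ∧ (pvMsort a).2 = (invN a : Int) := by
  fun_induction pvMsort a with
  | case1 a h =>
    match a, h with
    | [], _ => exact ⟨List.Perm.refl _, by simp, by simp [invN]⟩
    | [x], _ => exact ⟨List.Perm.refl _, by simp, by simp [invN]⟩
    | x :: y :: t, h => simp at h
  | case2 a h mid l r m ihl ihr =>
    obtain ⟨pl, sl, cl⟩ := ihl
    obtain ⟨pr, sr, cr⟩ := ihr
    obtain ⟨pm, sm, cm⟩ := pvMerge_spec l.1 r.1 sl sr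
    refine ⟨?_, sm, ?_⟩
    · exact pm.trans ((pl.append pr).trans (by rw [List.take_append_drop]))
    · show l.2 + r.2 + m.2 = _
      rw [show l.2 = (pvMsort (a.take mid)).2 from rfl, cl,
          show r.2 = (pvMsort (a.drop mid)).2 from rfl, cr,
          show m.2 = (pvMerge l.1 r.1).2 from rfl, cm,
          crossN_perm_left pl, crossN_perm_right _ pr,
          show (invN a : Int) = (invN (a.take mid ++ a.drop mid) : Int) by rw [List.take_append_drop],
          invN_append]
      push_cast
      ring

-- ===== VERDICT (by name: the statement is the Claim_ definition above) =====
theorem number_of_intersecting_line_segments_spec : Claim_equal_number_of_intersecting_line_segments := by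
  intro P Q _
  unfold Spec_number_of_intersecting_line_segments
  unfold number_of_intersecting_line_segments number_of_intersecting_line_segments_alt
  simp only [foldl_append_singleton, List.nil_append]
  rw [(pvMsort_spec _).2.2]
  have h := outer_fold (PySem.List.sorted (P.zip Q) (fun x => x.1) false) 0 0 (Nat.zero_le _)
  simpa using h
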